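-- pv_equiv track=rewrite | github.com/Scratouze/TestPython | Exercices/exercices_Python.py | maximum_integer
-- ===== SOURCE A (Python) =====
-- def maximum_integer(a: int) -> list:
--     somme = 0
--     i = 0
--     ints = []
--     while somme < a:
--         ints.append(i)
--         i += 1
--         somme += i
--     return ints
-- ===== SOURCE B (Python) =====
-- def maximum_integer(a: int) -> list:
--     # Binary search for the least n with n*(n+1)/2 >= a, then emit range(n) directly.
--     if a <= 0:
--         return []
--     lo, hi = 0, a
--     while lo < hi:
--         mid = (lo + hi) // 2
--         if mid * (mid + 1) >= 2 * a:
--             hi = mid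
--         else:
--             lo = mid + 1
--     return list(range(lo))
-- ===== Notes on version B (the rewrite author's own statement) =====
-- stated objective: alternative
-- what changed: Replaces the linear cumulative-sum loop by a binary search for the least n whose triangular number reaches a, then emits list(range(n)) directly.
import Mathlib
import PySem

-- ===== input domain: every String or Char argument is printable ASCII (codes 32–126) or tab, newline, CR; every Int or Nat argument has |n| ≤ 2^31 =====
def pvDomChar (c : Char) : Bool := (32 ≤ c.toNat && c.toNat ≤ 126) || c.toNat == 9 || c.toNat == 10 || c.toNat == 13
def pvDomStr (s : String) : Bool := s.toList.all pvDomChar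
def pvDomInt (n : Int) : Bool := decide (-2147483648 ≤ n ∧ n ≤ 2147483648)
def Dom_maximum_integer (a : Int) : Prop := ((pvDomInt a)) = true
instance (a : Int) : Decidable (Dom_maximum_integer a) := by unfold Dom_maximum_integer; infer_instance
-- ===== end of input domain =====

-- ===== PORT A =====
-- B replaces A's linear cumulative-sum loop with a binary search for the answer length (objective: alternative algorithm).
-- A's while loop: state (somme, i, ints); somme and i only ever hold naturals at run time.
def pvLoopA (a : Int) (somme i : Nat) (ints : List Int) : List Int :=
  if (somme : Int) < a then
    pvLoopA a (somme + (i + 1)) (i + 1) (ints ++ [(i : Int)])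
  else ints
termination_by (a - somme).toNat
decreasing_by omega

def maximum_integer (a : Int) : List Int :=
  pvLoopA a 0 0 []

-- ===== PORT B =====
-- Source B's while loop: binary search on [lo, hi) for the least n with n*(n+1) >= 2*a.
def pvLoopB (a lo hi : Int) : Int :=
  if h : lo < hi then
    let mid := PySem.Int.floordiv (lo + hi) 2
    if 2 * a ≤ mid * (mid + 1) then pvLoopB a lo mid
    else pvLoopB a (mid + 1) hi
  else lo
termination_by (hi - lo).toNat
decreasing_by
  · have _h1 : lo ≤ PySem.Int.floordiv (lo + hi) 2 :=
      (PySem.Int.le_floordiv_iff_mul_le (by omega : (0:Int) < 2)).mpr (by omega)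
    have h2 : PySem.Int.floordiv (lo + hi) 2 < hi :=
      (PySem.Int.floordiv_lt_iff_lt_mul (by omega : (0:Int) < 2)).mpr (by omega)
    omega
  · have h1 : lo ≤ PySem.Int.floordiv (lo + hi) 2 :=
      (PySem.Int.le_floordiv_iff_mul_le (by omega : (0:Int) < 2)).mpr (by omega)
    have h2 : PySem.Int.floordiv (lo + hi) 2 < hi :=
      (PySem.Int.floordiv_lt_iff_lt_mul (by omega : (0:Int) < 2)).mpr (by omega)
    omega

def maximum_integer_alt (a : Int) : List Int :=
  if a ≤ 0 then []
  else PySem.List.pyRange 0 (pvLoopB a 0 a) 1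

-- ===== PRECONDITION & SPEC =====
def Spec_maximum_integer (a : Int) (out : List Int) : Prop := out = maximum_integer_alt a
instance (a : Int) (out : List Int) : Decidable (Spec_maximum_integer a out) := by unfold Spec_maximum_integer; infer_instance

-- ===== CLAIM (what is proved, stated in full; the proofs are below) =====
def Claim_equal_maximum_integer : Prop := ∀ (a : Int), Dom_maximum_integer a → Spec_maximum_integer a (maximum_integer a)

-- ===== LEMMAS AND PROOFS =====

-- triangular numbers: tri n = 0 + 1 + ... + n
def pvTri : Nat → Nat
  | 0 => 0
  | n + 1 => pvTri n + (n + 1)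

theorem pvTri_ge_self (n : Nat) : n ≤ pvTri n := by
  induction n with
  | zero => simp [pvTri]
  | succ k ih => simp only [pvTri]; omega

theorem pvTri_mono {m n : Nat} (h : m ≤ n) : pvTri m ≤ pvTri n := by
  induction n with
  | zero => rw [Nat.le_zero.mp h]
  | succ k ih =>
    rcases Nat.eq_or_lt_of_le h with rfl | h'
    · exact le_refl _
    · exact le_trans (ih (by omega)) (by simp only [pvTri]; omega)

theorem pvTri_double (n : Nat) : 2 * pvTri n = n * (n + 1) := by
  induction n with
  | zero => simp [pvTri]
  | succ k ih => simp only [pvTri]; ring_nf; ring_nf at ih; omega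

theorem pvExists_tri (a : Int) : ∃ n : Nat, a ≤ (pvTri n : Int) :=
  ⟨a.toNat, by have := pvTri_ge_self a.toNat; omega⟩

-- the answer length: least n with tri n ≥ a
def pvN (a : Int) : Nat := Nat.find (pvExists_tri a)

theorem pvN_spec (a : Int) : a ≤ (pvTri (pvN a) : Int) := Nat.find_spec (pvExists_tri a)

theorem pvN_le {a : Int} {m : Nat} (h : a ≤ (pvTri m : Int)) : pvN a ≤ m :=
  Nat.find_le h

theorem pvN_gt {a : Int} {m : Nat} (h : (pvTri m : Int) < a) : m < pvN a := by
  by_contra hc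
  have h1 := pvTri_mono (show pvN a ≤ m by omega)
  have h2 := pvN_spec a
  omega

theorem loopA_eq (a : Int) :
    ∀ (d i : Nat) (acc : List Int), pvN a - i = d → i ≤ pvN a →
      pvLoopA a (pvTri i) i acc =
        acc ++ PySem.List.pyRange (i : Int) (pvN a : Int) 1 := by
  intro d
  induction d with
  | zero =>
    intro i acc hd hi
    have hie : i = pvN a := by omega
    rw [pvLoopA]
    have hng : ¬ ((pvTri i : Int) < a) := by have := pvN_spec a; rw [hie]; omega
    rw [if_neg hng, hie, PySem.List.pyRange_one_eq_nil (by omega)]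
    simp
  | succ d ih =>
    intro i acc hd hi
    have hlt : i < pvN a := by omega
    have hcond : (pvTri i : Int) < a := by
      by_contra hc
      have := pvN_le (show a ≤ (pvTri i : Int) by omega)
      omega
    rw [pvLoopA, if_pos hcond]
    have hstep : pvTri i + (i + 1) = pvTri (i + 1) := by simp [pvTri]
    rw [hstep, ih (i + 1) (acc ++ [(i : Int)]) (by omega) (by omega)]
    have hcons := PySem.List.pyRange_one_cons
      (show (i : Int) < (pvN a : Int) by exact_mod_cast hlt)
    rw [hcons]
    simp

theorem loopB_eq (a : Int) :
    ∀ (d : Nat) (lo hi : Int), (hi - lo).toNat = d →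
      0 ≤ lo → lo ≤ (pvN a : Int) → (pvN a : Int) ≤ hi →
      pvLoopB a lo hi = (pvN a : Int) := by
  intro d
  induction d using Nat.strong_induction_on with
  | _ d ih =>
    intro lo hi hd hlo hloN hNhi
    rw [pvLoopB]
    by_cases h : lo < hi
    · rw [dif_pos h]
      have h1 : lo ≤ PySem.Int.floordiv (lo + hi) 2 :=
        (PySem.Int.le_floordiv_iff_mul_le (by omega : (0:Int) < 2)).mpr (by omega)
      have h2 : PySem.Int.floordiv (lo + hi) 2 < hi :=
        (PySem.Int.floordiv_lt_iff_lt_mul (by omega : (0:Int) < 2)).mpr (by omega)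
      set mid := PySem.Int.floordiv (lo + hi) 2 with hmid
      have hmid0 : 0 ≤ mid := by omega
      have hmidnat : ((mid.toNat : Nat) : Int) = mid := Int.toNat_of_nonneg hmid0
      have htri : (2 : Int) * (pvTri mid.toNat : Int) = mid * (mid + 1) := by
        have h0 : ((2 * pvTri mid.toNat : Nat) : Int) = ((mid.toNat * (mid.toNat + 1) : Nat) : Int) := by
          rw [pvTri_double mid.toNat]
        push_cast at h0
        rw [hmidnat] at h0
        linarith
      by_cases hc : 2 * a ≤ mid * (mid + 1)
      · rw [if_pos hc]
        have hN : (pvN a : Int) ≤ mid := by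
          have hle : a ≤ (pvTri mid.toNat : Int) := by omega
          have := pvN_le hle
          omega
        exact ih (mid - lo).toNat (by omega) lo mid rfl hlo hloN hN
      · rw [if_neg hc]
        have hN : mid + 1 ≤ (pvN a : Int) := by
          have hlt : (pvTri mid.toNat : Int) < a := by omega
          have := pvN_gt hlt
          omega
        exact ih (hi - (mid + 1)).toNat (by omega) (mid + 1) hi rfl (by omega) hN hNhi
    · rw [dif_neg h]
      omega

theorem alt_eq (a : Int) : maximum_integer_alt a = PySem.List.pyRange 0 (pvN a : Int) 1 := by
  unfold maximum_integer_alt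
  by_cases ha : a ≤ 0
  · rw [if_pos ha]
    have hN : pvN a = 0 := Nat.le_zero.mp (pvN_le (by simpa [pvTri] using ha))
    rw [hN, PySem.List.pyRange_one_eq_nil (by omega)]
  · rw [if_neg ha]
    have hNa : (pvN a : Int) ≤ a := by
      have h1 := pvTri_ge_self a.toNat
      have h2 := pvN_le (show a ≤ (pvTri a.toNat : Int) by omega)
      omega
    rw [loopB_eq a (a - 0).toNat 0 a rfl (by omega) (by omega) hNa]

-- ===== VERDICT (by name: the statement is the Claim_ definition above) =====
theorem maximum_integer_spec : Claim_equal_maximum_integer := by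
  intro a _
  unfold Spec_maximum_integer
  have hA : maximum_integer a = PySem.List.pyRange 0 (pvN a : Int) 1 := by
    unfold maximum_integer
    have := loopA_eq a (pvN a) 0 [] (by omega) (by omega)
    simpa [pvTri] using this
  rw [hA, alt_eq]
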